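-- pv_equiv track=rewrite | github.com/ethan-coe-renner/cryptography-final-project | python/TextBites.py | chunks2text
-- ===== SOURCE A (Python) =====
-- def chunks2text(u64chunkArray):
--     word = []
--     str = ''
--     for chunk in u64chunkArray:
--         while chunk != 0:
--             word.append(chunk % 2**8)
--             chunk >>= 8
--     for byte in word:
--         char = chr(byte)
--         str = str + char
--     return str
-- ===== SOURCE B (Python) =====
-- def chunks2text(u64chunkArray):
--     word = bytearray()
--     for chunk in u64chunkArray:
--         word += chunk.to_bytes((chunk.bit_length() + 7) // 8, 'little')
--     return bytes(word).decode('latin-1')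
-- ===== Notes on version B (the rewrite author's own statement) =====
-- stated objective: idiomatic
-- what changed: Replaces the hand-written shift/mask while-loop and char-by-char string concatenation with int.to_bytes minimal little-endian conversion into a bytearray plus a single latin-1 decode.
import Mathlib
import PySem

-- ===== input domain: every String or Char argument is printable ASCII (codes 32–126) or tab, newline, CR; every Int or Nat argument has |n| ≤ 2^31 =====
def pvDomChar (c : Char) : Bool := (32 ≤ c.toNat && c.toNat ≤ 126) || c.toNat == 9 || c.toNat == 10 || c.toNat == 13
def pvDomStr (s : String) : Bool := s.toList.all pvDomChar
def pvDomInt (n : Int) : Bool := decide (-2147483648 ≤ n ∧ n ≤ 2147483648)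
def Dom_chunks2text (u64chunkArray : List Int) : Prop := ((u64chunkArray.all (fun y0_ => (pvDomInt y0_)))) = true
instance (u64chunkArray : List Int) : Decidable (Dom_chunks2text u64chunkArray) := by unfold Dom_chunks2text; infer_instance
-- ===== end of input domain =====

-- B is idiomatic: minimal little-endian int.to_bytes per chunk into a bytearray, then one latin-1 decode,
-- instead of A's shift/mask while-loop and char-by-char concatenation.  Pre_ excludes negative chunks
-- (there A's while-loop never terminates, B's to_bytes raises OverflowError).

-- ===== PORT A =====
-- the 'while chunk != 0' loop; for chunk < 0 the Python loop diverges (excluded by Pre_),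
-- so the recursion is guarded by 0 < chunk purely for totality
def whileBytes (chunk : Int) : List Int :=
  if _h : 0 < chunk then
    PySem.Int.mod chunk 256 :: whileBytes (PySem.Int.floordiv chunk 256)
  else []
termination_by chunk.toNat
decreasing_by
  have : PySem.Int.floordiv chunk 256 = chunk / 256 :=
    PySem.Int.floordiv_eq_ediv_of_pos (by omega)
  rw [this]; omega

def chunks2text (u64chunkArray : List Int) : String :=
  -- word = first loop's byte list, then str = second loop's concatenation
  (u64chunkArray.foldl (fun w chunk => w ++ whileBytes chunk) []).foldl
    (fun s byte => s.push (Char.ofNat byte.toNat)) ""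

-- ===== PORT B =====
-- int.bit_length() for a nonnegative int, recursively (n.bit_length() = 0 for n = 0, else 1 + (n>>1).bit_length())
def bitLen (n : Nat) : Nat :=
  if n = 0 then 0 else bitLen (n / 2) + 1

-- chunk.to_bytes(nb, 'little') ported by hand, exact for nonnegative chunk: byte i is (chunk >> 8*i) & 0xff
def leBytes (n : Nat) : List Nat :=
  (List.range ((bitLen n + 7) / 8)).map (fun i => n >>> (8 * i) % 256)

-- latin-1 decode of byte b is the char of code b
def chunks2text_alt (u64chunkArray : List Int) : String :=
  String.ofList ((u64chunkArray.foldl (fun w chunk => w ++ leBytes chunk.toNat) []).map Char.ofNat)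

-- ===== PRECONDITION & SPEC =====
-- Pre_ excludes negative chunks: A's while-loop never terminates there (chunk >>= 8 stalls at -1)
def Pre_chunks2text (u64chunkArray : List Int) : Prop :=
  ∀ c ∈ u64chunkArray, 0 ≤ c
instance (u64chunkArray : List Int) : Decidable (Pre_chunks2text u64chunkArray) := by
  unfold Pre_chunks2text; infer_instance
def pvWitness_chunks2text : List Int := [65, 16706, 0]

def Spec_chunks2text (u64chunkArray : List Int) (out : String) : Prop := out = chunks2text_alt u64chunkArray
instance (u64chunkArray : List Int) (out : String) : Decidable (Spec_chunks2text u64chunkArray out) := by unfold Spec_chunks2text; infer_instance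

-- ===== CLAIM (what is proved, stated in full; the proofs are below) =====
def Claim_equal_chunks2text : Prop := ∀ (u64chunkArray : List Int), Dom_chunks2text u64chunkArray → Pre_chunks2text u64chunkArray → Spec_chunks2text u64chunkArray (chunks2text u64chunkArray)

-- ===== LEMMAS AND PROOFS =====

theorem bitLen_pos_ne (n : Nat) (h : n ≠ 0) : bitLen n = bitLen (n / 2) + 1 := by
  rw [bitLen]; simp [h]

theorem bitLen_le (k : Nat) : ∀ n, n < 2 ^ k → bitLen n ≤ k := by
  induction k with
  | zero =>
    intro n h
    simp only [pow_zero] at h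
    have hn : n = 0 := by omega
    simp [hn, bitLen]
  | succ k ih =>
    intro n h
    by_cases h0 : n = 0
    · simp [h0, bitLen]
    · rw [bitLen_pos_ne n h0]
      have : n / 2 < 2 ^ k := by
        have := Nat.pow_succ 2 k ▸ h; omega
      exact Nat.succ_le_succ (ih _ this)

theorem bitLen_div256 (n : Nat) (h : 256 ≤ n) : bitLen n = bitLen (n / 256) + 8 := by
  have e1 : bitLen n = bitLen (n / 2) + 1 := bitLen_pos_ne n (by omega)
  have e2 : bitLen (n / 2) = bitLen (n / 2 / 2) + 1 := bitLen_pos_ne _ (by omega)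
  have e3 : bitLen (n / 2 / 2) = bitLen (n / 2 / 2 / 2) + 1 := bitLen_pos_ne _ (by omega)
  have e4 : bitLen (n / 2 / 2 / 2) = bitLen (n / 2 / 2 / 2 / 2) + 1 := bitLen_pos_ne _ (by omega)
  have e5 : bitLen (n / 2 / 2 / 2 / 2) = bitLen (n / 2 / 2 / 2 / 2 / 2) + 1 := bitLen_pos_ne _ (by omega)
  have e6 : bitLen (n / 2 / 2 / 2 / 2 / 2) = bitLen (n / 2 / 2 / 2 / 2 / 2 / 2) + 1 := bitLen_pos_ne _ (by omega)
  have e7 : bitLen (n / 2 / 2 / 2 / 2 / 2 / 2) = bitLen (n / 2 / 2 / 2 / 2 / 2 / 2 / 2) + 1 := bitLen_pos_ne _ (by omega)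
  have e8 : bitLen (n / 2 / 2 / 2 / 2 / 2 / 2 / 2) = bitLen (n / 2 / 2 / 2 / 2 / 2 / 2 / 2 / 2) + 1 := bitLen_pos_ne _ (by omega)
  have ed : n / 2 / 2 / 2 / 2 / 2 / 2 / 2 / 2 = n / 256 := by omega
  rw [e1, e2, e3, e4, e5, e6, e7, e8, ed]

-- number of bytes drops by one when the chunk is divided by 256
theorem nb_succ (n : Nat) (h : n ≠ 0) :
    (bitLen n + 7) / 8 = (bitLen (n / 256) + 7) / 8 + 1 := by
  by_cases h256 : 256 ≤ n
  · rw [bitLen_div256 n h256]; omega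
  · have hd : n / 256 = 0 := by omega
    have hle : bitLen n ≤ 8 := bitLen_le 8 n (by omega)
    have hpos : bitLen n ≠ 0 := by
      rw [bitLen_pos_ne n h]; omega
    have hb0 : bitLen 0 = 0 := by rw [bitLen]; rfl
    rw [hd, hb0]; omega

theorem leBytes_shift (n i : Nat) : n >>> (8 * (i + 1)) = (n / 256) >>> (8 * i) := by
  simp only [Nat.shiftRight_eq_div_pow]
  rw [Nat.div_div_eq_div_mul]
  congr 1
  rw [show 8 * (i + 1) = 8 * i + 8 by ring, Nat.pow_add]
  norm_num [Nat.mul_comm]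

-- one step of B's byte list: for n ≠ 0 it is the low byte followed by the bytes of n / 256
theorem leBytes_succ (n : Nat) (h : n ≠ 0) : leBytes n = n % 256 :: leBytes (n / 256) := by
  unfold leBytes
  rw [nb_succ n h, List.range_succ_eq_map, List.map_cons, List.map_map]
  refine congrArg₂ List.cons (by simp) ?_
  exact List.map_congr_left (fun i _ => by
    simp only [Function.comp_apply, Nat.succ_eq_add_one]
    rw [leBytes_shift])

-- A's inner while-loop produces exactly B's minimal little-endian bytes (as Ints)
theorem whileBytes_eq (n : Nat) : whileBytes (n : Int) = (leBytes n).map (fun b => Int.ofNat b) := by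
  induction n using Nat.strong_induction_on with
  | _ n ih =>
    by_cases h0 : n = 0
    · subst h0
      rw [whileBytes, leBytes]
      simp [bitLen]
    · rw [whileBytes]
      have hpos : (0 : Int) < n := by exact_mod_cast Nat.pos_of_ne_zero h0
      rw [dif_pos hpos]
      have hm : PySem.Int.mod (n : Int) 256 = ((n % 256 : Nat) : Int) := by
        exact_mod_cast PySem.Int.mod_natCast n 256
      have hd : PySem.Int.floordiv (n : Int) 256 = ((n / 256 : Nat) : Int) := by
        exact_mod_cast PySem.Int.floordiv_natCast n 256
      rw [hm, hd, ih (n / 256) (by omega), leBytes_succ n h0, List.map_cons]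
      rfl

-- A's second loop: folding push over the byte list is String.mk of the mapped chars
theorem foldl_push (bs : List Int) (s : String) :
    bs.foldl (fun s byte => s.push (Char.ofNat byte.toNat)) s
      = s ++ String.ofList (bs.map (fun byte => Char.ofNat byte.toNat)) := by
  induction bs generalizing s with
  | nil =>
    apply String.toList_inj.mp
    simp
  | cons b bs ih =>
    simp only [List.foldl_cons, List.map_cons, ih]
    apply String.toList_inj.mp
    simp

-- the two word-building folds agree (A's word is the Int cast of B's word)
theorem word_eq (l : List Int) (hl : ∀ c ∈ l, 0 ≤ c) (w : List Nat) :
    l.foldl (fun w chunk => w ++ whileBytes chunk) (w.map (fun b => Int.ofNat b))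
      = (l.foldl (fun w chunk => w ++ leBytes chunk.toNat) w).map (fun b => Int.ofNat b) := by
  induction l generalizing w with
  | nil => simp
  | cons c l ih =>
    simp only [List.foldl_cons]
    have hc : (0:Int) ≤ c := hl c (List.mem_cons_self ..)
    have : c = ((c.toNat : Nat) : Int) := by omega
    rw [this, whileBytes_eq, ← List.map_append]
    simp only [Int.toNat_natCast]
    exact ih (fun x hx => hl x (List.mem_cons_of_mem _ hx)) _

-- ===== VERDICT (by name: the statement is the Claim_ definition above) =====
theorem chunks2text_spec : Claim_equal_chunks2text := by
  intro l _ hpre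
  unfold Spec_chunks2text chunks2text chunks2text_alt
  have hw := word_eq l hpre []
  simp only [List.map_nil] at hw
  rw [hw, foldl_push]
  apply String.toList_inj.mp
  simp [List.map_map, Function.comp_def]
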